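-- pv_equiv track=rewrite | github.com/akashmathew18/MINI-PROJECT-III | script_analysis/script_analyzer.py | _describe_detailed_conflict
-- ===== SOURCE A (Python) =====
-- def _describe_detailed_conflict(scene: str, scene_index: int) -> str:
--     """Describe conflicts in detail with context."""
--     conflict_words = ['argue', 'fight', 'disagree', 'conflict', 'tension', 'angry', 'frustrated', 'attack', 'challenge', 'oppose']
--     scene_lower = scene.lower()
--
--     for word in conflict_words:
--         if word in scene_lower:
--             if 'argue' in scene_lower:
--                 return f"Scene {scene_index+1}: Characters engage in a heated argument that reveals deeper tensions and conflicting perspectives"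
--             elif 'fight' in scene_lower:
--                 return f"Scene {scene_index+1}: Physical confrontation occurs, escalating the dramatic tension"
--             elif 'disagree' in scene_lower:
--                 return f"Scene {scene_index+1}: Characters disagree on fundamental issues, creating ideological conflict"
--             elif 'tension' in scene_lower:
--                 return f"Scene {scene_index+1}: Tension builds between characters, creating suspense and emotional stakes"
--
--     return f"Scene {scene_index+1}: Conflict emerges through character interactions and opposing motivations"
-- ===== SOURCE B (Python) =====
-- _CONFLICT_RULES = [
--     ('argue', "Characters engage in a heated argument that reveals deeper tensions and conflicting perspectives"),
--     ('fight', "Physical confrontation occurs, escalating the dramatic tension"),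
--     ('disagree', "Characters disagree on fundamental issues, creating ideological conflict"),
--     ('tension', "Tension builds between characters, creating suspense and emotional stakes"),
-- ]
--
-- _DEFAULT_CONFLICT = "Conflict emerges through character interactions and opposing motivations"
--
--
-- def _describe_detailed_conflict(scene: str, scene_index: int) -> str:
--     """Describe conflicts in detail with context."""
--     scene_lower = scene.lower()
--     body = next((msg for word, msg in _CONFLICT_RULES if word in scene_lower),
--                 _DEFAULT_CONFLICT)
--     return f"Scene {scene_index + 1}: {body}"
-- ===== Notes on version B (the rewrite author's own statement) =====
-- stated objective: simpler
-- what changed: Replaced A's 10-word scan loop with nested if/elif returns by a data-driven (keyword, message) rule table: a single first-match lookup over the table picks the message body (the loop's fall-through cases all yield the generic default, so the table needs only the four deciding keywords), and the 'Scene {i+1}: ' prefix is factored out and built once rather than repeated in five f-strings.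
import Mathlib
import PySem

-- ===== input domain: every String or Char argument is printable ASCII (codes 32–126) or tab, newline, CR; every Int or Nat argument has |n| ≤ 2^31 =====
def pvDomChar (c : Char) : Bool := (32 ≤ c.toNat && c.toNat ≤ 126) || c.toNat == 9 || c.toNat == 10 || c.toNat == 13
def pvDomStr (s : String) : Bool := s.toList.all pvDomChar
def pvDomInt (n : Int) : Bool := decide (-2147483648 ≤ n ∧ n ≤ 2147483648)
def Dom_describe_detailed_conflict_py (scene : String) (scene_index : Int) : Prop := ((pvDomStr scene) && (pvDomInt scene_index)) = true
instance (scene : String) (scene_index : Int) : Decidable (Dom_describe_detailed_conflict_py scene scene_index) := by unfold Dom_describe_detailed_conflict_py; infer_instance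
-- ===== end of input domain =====

-- B replaces A's 10-word scan loop with nested if/elif returns by a first-match lookup over a
-- (keyword, message) rule table, with the "Scene {i+1}: " prefix factored out and built once: simpler.


-- ===== PORT A =====
-- A's f-string message literals
def pvMsgArgue (i : Int) : String := "Scene " ++ PySem.Int.toStr (i + 1) ++ ": Characters engage in a heated argument that reveals deeper tensions and conflicting perspectives"
def pvMsgFight (i : Int) : String := "Scene " ++ PySem.Int.toStr (i + 1) ++ ": Physical confrontation occurs, escalating the dramatic tension"
def pvMsgDisagree (i : Int) : String := "Scene " ++ PySem.Int.toStr (i + 1) ++ ": Characters disagree on fundamental issues, creating ideological conflict"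
def pvMsgTension (i : Int) : String := "Scene " ++ PySem.Int.toStr (i + 1) ++ ": Tension builds between characters, creating suspense and emotional stakes"
def pvMsgDefault (i : Int) : String := "Scene " ++ PySem.Int.toStr (i + 1) ++ ": Conflict emerges through character interactions and opposing motivations"

-- the 'for word in conflict_words' loop with early return; none = the loop falls through
def pvLoopA (scene_lower : String) (i : Int) : List String → Option String
  | [] => none
  | w :: ws =>
    if PySem.Str.isIn w scene_lower then
      if PySem.Str.isIn "argue" scene_lower then some (pvMsgArgue i)
      else if PySem.Str.isIn "fight" scene_lower then some (pvMsgFight i)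
      else if PySem.Str.isIn "disagree" scene_lower then some (pvMsgDisagree i)
      else if PySem.Str.isIn "tension" scene_lower then some (pvMsgTension i)
      else pvLoopA scene_lower i ws   -- inner if/elif has no else: continue the loop
    else pvLoopA scene_lower i ws

def describe_detailed_conflict_py (scene : String) (scene_index : Int) : String :=
  let scene_lower := PySem.Str.lower scene
  (pvLoopA scene_lower scene_index
    ["argue", "fight", "disagree", "conflict", "tension", "angry", "frustrated", "attack", "challenge", "oppose"]).getD
    (pvMsgDefault scene_index)

-- ===== PORT B =====
-- module-level rule table _CONFLICT_RULES from Source B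
def pvConflictRules : List (String × String) :=
  [("argue", "Characters engage in a heated argument that reveals deeper tensions and conflicting perspectives"),
   ("fight", "Physical confrontation occurs, escalating the dramatic tension"),
   ("disagree", "Characters disagree on fundamental issues, creating ideological conflict"),
   ("tension", "Tension builds between characters, creating suspense and emotional stakes")]

def pvDefaultConflict : String := "Conflict emerges through character interactions and opposing motivations"

-- 'next((msg for word, msg in rules if word in scene_lower), default)'
def pvFirstMatch (scene_lower : String) : List (String × String) → Option String
  | [] => none
  | (w, m) :: rs => if PySem.Str.isIn w scene_lower then some m else pvFirstMatch scene_lower rs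

def describe_detailed_conflict_py_alt (scene : String) (scene_index : Int) : String :=
  let scene_lower := PySem.Str.lower scene
  let body := (pvFirstMatch scene_lower pvConflictRules).getD pvDefaultConflict
  "Scene " ++ PySem.Int.toStr (scene_index + 1) ++ ": " ++ body

-- ===== PRECONDITION & SPEC =====
def Spec_describe_detailed_conflict_py (scene : String) (scene_index : Int) (out : String) : Prop := out = describe_detailed_conflict_py_alt scene scene_index
instance (scene : String) (scene_index : Int) (out : String) : Decidable (Spec_describe_detailed_conflict_py scene scene_index out) := by unfold Spec_describe_detailed_conflict_py; infer_instance

-- ===== CLAIM =====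
def Claim_equal_describe_detailed_conflict_py : Prop := ∀ (scene : String) (scene_index : Int), Dom_describe_detailed_conflict_py scene scene_index → Spec_describe_detailed_conflict_py scene scene_index (describe_detailed_conflict_py scene scene_index)

-- ===== LEMMAS AND PROOFS =====
-- if none of the four deciding words occurs, A's loop falls through for every word list
theorem pvLoopA_none (sl : String) (i : Int)
    (h1 : PySem.Str.isIn "argue" sl = false) (h2 : PySem.Str.isIn "fight" sl = false)
    (h3 : PySem.Str.isIn "disagree" sl = false) (h4 : PySem.Str.isIn "tension" sl = false) :
    ∀ ws : List String, pvLoopA sl i ws = none := by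
  intro ws
  simp at h1 h2 h3 h4
  induction ws with
  | nil => rfl
  | cons w ws ih => simp [pvLoopA, h1, h2, h3, h4, ih]

-- the two f-string shapes agree: A's per-branch literals are B's prefix ++ body
set_option maxRecDepth 8000 in
theorem pvMsg_eq (i : Int) :
    pvMsgArgue i = "Scene " ++ PySem.Int.toStr (i + 1) ++ ": " ++ "Characters engage in a heated argument that reveals deeper tensions and conflicting perspectives" ∧
    pvMsgFight i = "Scene " ++ PySem.Int.toStr (i + 1) ++ ": " ++ "Physical confrontation occurs, escalating the dramatic tension" ∧
    pvMsgDisagree i = "Scene " ++ PySem.Int.toStr (i + 1) ++ ": " ++ "Characters disagree on fundamental issues, creating ideological conflict" ∧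
    pvMsgTension i = "Scene " ++ PySem.Int.toStr (i + 1) ++ ": " ++ "Tension builds between characters, creating suspense and emotional stakes" ∧
    pvMsgDefault i = "Scene " ++ PySem.Int.toStr (i + 1) ++ ": " ++ pvDefaultConflict := by
  refine ⟨?_, ?_, ?_, ?_, ?_⟩ <;>
    · conv_rhs => rw [String.append_assoc]
      rfl

-- ===== VERDICT =====
theorem describe_detailed_conflict_py_spec : Claim_equal_describe_detailed_conflict_py := by
  intro scene i _
  unfold Spec_describe_detailed_conflict_py describe_detailed_conflict_py describe_detailed_conflict_py_alt
  obtain ⟨e1, e2, e3, e4, e5⟩ := pvMsg_eq i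
  set sl := PySem.Str.lower scene with hsl
  by_cases h1 : PySem.Str.isIn "argue" sl = true
  · simp at h1 ⊢
    simp [pvLoopA, pvFirstMatch, pvConflictRules, h1, e1]
  · rw [Bool.not_eq_true] at h1
    by_cases h2 : PySem.Str.isIn "fight" sl = true
    · simp at h1 h2 ⊢
      simp [pvLoopA, pvFirstMatch, pvConflictRules, h1, h2, e2]
    · rw [Bool.not_eq_true] at h2
      by_cases h3 : PySem.Str.isIn "disagree" sl = true
      · simp at h1 h2 h3 ⊢
        simp [pvLoopA, pvFirstMatch, pvConflictRules, h1, h2, h3, e3]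
      · rw [Bool.not_eq_true] at h3
        by_cases h4 : PySem.Str.isIn "tension" sl = true
        · simp at h1 h2 h3 h4 ⊢
          simp [pvLoopA, pvFirstMatch, pvConflictRules, h1, h2, h3, h4, e4]
        · rw [Bool.not_eq_true] at h4
          have hn := pvLoopA_none sl i h1 h2 h3 h4
          simp at h1 h2 h3 h4 ⊢
          simp [pvFirstMatch, pvConflictRules, hn, h1, h2, h3, h4, e5]
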